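-- pv_equiv track=rewrite | github.com/anezuniga/grammar_truss_microstructure | scripts_generation/feasibility.py | fulfill_vertex
-- ===== SOURCE A (Python) =====
-- def get_connection_indexes(connection_matrix, vertex_index):
--     connection_indexes = []
--     for i, value in enumerate(connection_matrix[vertex_index]):
--         if value == 1:
--             connection_indexes.append(i)
--     return connection_indexes
--
-- def fulfill_vertex(vertices, vertex_index, connection_matrix):
--     connected_indexes = get_connection_indexes(connection_matrix, vertex_index)
--     connected_vertices = [vertices[i] for i in connected_indexes]
--
--     vertex = vertices[vertex_index]
--     on_face = any(coord == 0 or coord == 1 for coord in vertex)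
--
--     if on_face:
--         # Check if it has at least 2 connected vertices in the same face
--         same_face_count = sum(any(coord == 0 or coord == 1 for coord in connected_vertex) for connected_vertex in connected_vertices)
--         if same_face_count >= 2:
--             return True
--         # Check if it has 1 connected vertex somewhere else that is not on the same face
--         other_face_count = sum(1 for connected_vertex in connected_vertices if not any(coord == 0 or coord == 1 for coord in connected_vertex))
--         if other_face_count >= 1:
--             return True
--     else:
--         # Check if it has 2 any connections
--         if len(connected_vertices) >= 2:
--             return True
--     return False
-- ===== SOURCE B (Python) =====
-- def fulfill_vertex(vertices, vertex_index, connection_matrix):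
--     # Equivalent characterization: a vertex is fulfilled iff it has degree >= 2,
--     # or it lies on a face and has at least one connected vertex off the faces.
--     # (For on-face v: same>=2 or other>=1  <=>  same+other>=2 or other>=1.)
--     row = connection_matrix[vertex_index]
--     if row.count(1) >= 2:
--         return True
--     if any(c == 0 or c == 1 for c in vertices[vertex_index]):
--         return any(v == 1 and not any(c == 0 or c == 1 for c in vertices[i])
--                    for i, v in enumerate(row))
--     return False
-- ===== Notes on version B (the rewrite author's own statement) =====
-- stated objective: alternative
-- what changed: Replaces A's count-and-threshold scheme (two counted scans over a materialized neighbor list, branched on face membership) with a different logical characterization proved equivalent: fulfilled iff degree >= 2 (a plain row.count, no vertex lookups) or the vertex is on a face and an existential short-circuit search finds one off-face neighbor.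
import Mathlib
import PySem

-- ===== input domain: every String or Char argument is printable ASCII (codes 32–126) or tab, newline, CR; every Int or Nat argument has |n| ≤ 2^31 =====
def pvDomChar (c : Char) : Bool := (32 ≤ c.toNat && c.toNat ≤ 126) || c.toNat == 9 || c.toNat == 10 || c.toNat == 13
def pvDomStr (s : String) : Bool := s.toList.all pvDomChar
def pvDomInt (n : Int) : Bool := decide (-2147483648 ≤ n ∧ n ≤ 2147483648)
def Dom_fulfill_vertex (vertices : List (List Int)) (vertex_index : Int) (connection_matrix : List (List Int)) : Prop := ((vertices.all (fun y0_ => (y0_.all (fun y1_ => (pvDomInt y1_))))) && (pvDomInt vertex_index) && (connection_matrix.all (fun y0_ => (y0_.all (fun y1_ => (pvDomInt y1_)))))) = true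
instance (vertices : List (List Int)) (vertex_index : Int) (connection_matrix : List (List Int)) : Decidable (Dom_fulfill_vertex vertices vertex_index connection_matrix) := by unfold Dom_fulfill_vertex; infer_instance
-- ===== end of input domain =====

-- B replaces A's count-and-threshold scheme with an equivalent characterization:
-- fulfilled iff degree >= 2, or the vertex is on a face and some neighbor is off the faces
-- (objective: alternative).

-- ===== PORT A =====
def get_connection_indexes (connection_matrix : List (List Int)) (vertex_index : Int) : List Int :=
  (PySem.List.enumerate (PySem.List.pyGetD connection_matrix vertex_index [])).foldl
    (fun acc p => if p.2 == 1 then acc ++ [p.1] else acc) []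

def fulfill_vertex (vertices : List (List Int)) (vertex_index : Int) (connection_matrix : List (List Int)) : Bool :=
  let connected_indexes := get_connection_indexes connection_matrix vertex_index
  let connected_vertices := connected_indexes.map (fun i => PySem.List.pyGetD vertices i [])
  let vertex := PySem.List.pyGetD vertices vertex_index []
  let on_face := vertex.any (fun coord => coord == 0 || coord == 1)
  if on_face then
    let same_face_count : Int :=
      (connected_vertices.map (fun cv => if cv.any (fun coord => coord == 0 || coord == 1) then (1:Int) else 0)).sum
    if same_face_count ≥ 2 then true
    else
      let other_face_count : Int :=
        ((connected_vertices.filter (fun cv => !cv.any (fun coord => coord == 0 || coord == 1))).map (fun _ => (1:Int))).sum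
      if other_face_count ≥ 1 then true else false
  else
    if connected_vertices.length ≥ 2 then true else false

-- ===== PORT B =====
def is_on_face (v : List Int) : Bool := v.any (fun c => c == 0 || c == 1)

def fulfill_vertex_alt (vertices : List (List Int)) (vertex_index : Int) (connection_matrix : List (List Int)) : Bool :=
  let row := PySem.List.pyGetD connection_matrix vertex_index []
  if PySem.List.count row 1 ≥ 2 then true
  else if is_on_face (PySem.List.pyGetD vertices vertex_index []) then
    (PySem.List.enumerate row).any
      (fun p => p.2 == 1 && !is_on_face (PySem.List.pyGetD vertices p.1 []))
  else false

-- ===== PRECONDITION & SPEC =====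
-- Pre_ excludes exactly the inputs where the Python raises IndexError: vertex_index out of
-- Python range for the two lists, or a connection marked 1 at a column with no vertex.
def Pre_fulfill_vertex (vertices : List (List Int)) (vertex_index : Int) (connection_matrix : List (List Int)) : Prop :=
  PySem.Raise.InRange connection_matrix.length vertex_index ∧
  PySem.Raise.InRange vertices.length vertex_index ∧
  ∀ p ∈ PySem.List.enumerate (PySem.List.pyGetD connection_matrix vertex_index []),
    p.2 = 1 → p.1 < (vertices.length : Int)
instance (vertices : List (List Int)) (vertex_index : Int) (connection_matrix : List (List Int)) : Decidable (Pre_fulfill_vertex vertices vertex_index connection_matrix) := by unfold Pre_fulfill_vertex; infer_instance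

def pvWitness_fulfill_vertex : List (List Int) × Int × List (List Int) :=
  ([[0, 2], [2, 2], [1, 3]], 0, [[0, 1, 1], [1, 0, 0], [1, 0, 0]])

def Spec_fulfill_vertex (vertices : List (List Int)) (vertex_index : Int) (connection_matrix : List (List Int)) (out : Bool) : Prop := out = fulfill_vertex_alt vertices vertex_index connection_matrix
instance (vertices : List (List Int)) (vertex_index : Int) (connection_matrix : List (List Int)) (out : Bool) : Decidable (Spec_fulfill_vertex vertices vertex_index connection_matrix out) := by unfold Spec_fulfill_vertex; infer_instance

-- ===== CLAIM =====
def Claim_equal_fulfill_vertex : Prop := ∀ (vertices : List (List Int)) (vertex_index : Int) (connection_matrix : List (List Int)), Dom_fulfill_vertex vertices vertex_index connection_matrix → Pre_fulfill_vertex vertices vertex_index connection_matrix → Spec_fulfill_vertex vertices vertex_index connection_matrix (fulfill_vertex vertices vertex_index connection_matrix)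

-- ===== LEMMAS AND PROOFS =====

-- The filtered enumerated row has length = row.count 1.
theorem filter_enum_length (row : List Int) :
    ((PySem.List.enumerate row).filter (fun p => p.2 == 1)).length = row.count 1 := by
  rw [← List.countP_eq_length_filter, List.count_eq_countP]
  conv_rhs => rw [← PySem.List.map_snd_enumerate row 0]
  rw [List.countP_map]
  simp [Function.comp_def]

theorem fulfill_vertex_spec : Claim_equal_fulfill_vertex := by
  intro vertices vertex_index connection_matrix _ _
  unfold Spec_fulfill_vertex fulfill_vertex fulfill_vertex_alt get_connection_indexes
  rw [PySem.List.foldl_append_if]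
  simp only [List.nil_append, is_on_face, PySem.List.count_eq]
  rw [show ((PySem.List.enumerate (PySem.List.pyGetD connection_matrix vertex_index [])).any
      (fun p => p.2 == 1 && !(PySem.List.pyGetD vertices p.1 []).any (fun c => c == 0 || c == 1)))
    = (((PySem.List.enumerate (PySem.List.pyGetD connection_matrix vertex_index [])).filter
        (fun p => p.2 == 1)).any
        (fun p => !(PySem.List.pyGetD vertices p.1 []).any (fun c => c == 0 || c == 1))) from by
    rw [List.any_filter]]
  rw [← filter_enum_length]
  generalize (PySem.List.enumerate (PySem.List.pyGetD connection_matrix vertex_index [])).filter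
      (fun p => p.2 == 1) = r
  have hs : ((((r.map (fun p : Int × Int => p.1)).map (fun i => PySem.List.pyGetD vertices i [])).map
      (fun cv => if cv.any (fun coord => coord == 0 || coord == 1) then (1:Int) else 0)).sum)
      = (r.countP (fun p => (PySem.List.pyGetD vertices p.1 []).any (fun c => c == 0 || c == 1)) : Int) := by
    rw [PySem.List.sum_map_ite_one_zero]
    congr 1
    rw [List.countP_map, List.countP_map]
    simp [Function.comp_def]
  have ho : (((((r.map (fun p : Int × Int => p.1)).map (fun i => PySem.List.pyGetD vertices i [])).filter
      (fun cv => !cv.any (fun coord => coord == 0 || coord == 1))).map (fun _ => (1:Int))).sum)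
      = (r.countP (fun p => !(PySem.List.pyGetD vertices p.1 []).any (fun c => c == 0 || c == 1)) : Int) := by
    rw [PySem.List.sum_map_const_int, ← List.countP_eq_length_filter]
    rw [List.countP_map, List.countP_map]
    simp [Function.comp_def]
  have hl : (((r.map (fun p : Int × Int => p.1)).map (fun i => PySem.List.pyGetD vertices i [])).length)
      = r.countP (fun p => (PySem.List.pyGetD vertices p.1 []).any (fun c => c == 0 || c == 1))
        + r.countP (fun p => !(PySem.List.pyGetD vertices p.1 []).any (fun c => c == 0 || c == 1)) := by
    rw [List.length_map, List.length_map, List.length_eq_countP_add_countP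
      (fun p : Int × Int => (PySem.List.pyGetD vertices p.1 []).any (fun c => c == 0 || c == 1))]
    congr 1
    apply List.countP_congr
    intro a _
    simp
  have hany : (r.any (fun p => !(PySem.List.pyGetD vertices p.1 []).any (fun c => c == 0 || c == 1)))
      = decide (0 < r.countP (fun p => !(PySem.List.pyGetD vertices p.1 []).any (fun c => c == 0 || c == 1))) := by
    rw [Bool.eq_iff_iff]; simp [List.any_eq_true, List.countP_pos_iff]
  have hlen : r.length = (r.map (fun p : Int × Int => p.1)).length := by simp
  rw [hlen, show ((r.map (fun p : Int × Int => p.1)).length)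
      = (((r.map (fun p : Int × Int => p.1)).map (fun i => PySem.List.pyGetD vertices i [])).length) from by simp]
  simp only [hs, ho, hl, hany]
  set S := r.countP (fun p => (PySem.List.pyGetD vertices p.1 []).any (fun c => c == 0 || c == 1)) with hS
  set O := r.countP (fun p => !(PySem.List.pyGetD vertices p.1 []).any (fun c => c == 0 || c == 1)) with hO
  by_cases hof : ((PySem.List.pyGetD vertices vertex_index []).any (fun coord => coord == 0 || coord == 1)) = true
  · simp only [hof, if_true]
    by_cases hd : S + O ≥ 2
    · rw [if_pos hd]
      by_cases h2 : (S : Int) ≥ 2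
      · rw [if_pos h2]
      · rw [if_neg h2, if_pos (show (O : Int) ≥ 1 by omega)]
    · rw [if_neg hd, if_neg (show ¬ ((S : Int) ≥ 2) by omega)]
      by_cases h3 : 0 < O
      · rw [if_pos (show (O : Int) ≥ 1 by omega)]
        simp [h3]
      · rw [if_neg (show ¬ ((O : Int) ≥ 1) by omega), eq_comm, decide_eq_false_iff_not]
        exact h3
  · simp [hof]

-- ===== VERDICT =====
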